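-- pv_equiv track=rewrite | github.com/nickmeinhold/flux-shadow | src/immunity.py | _get_sensitivity_reason
-- ===== SOURCE A (Python) =====
-- SENSITIVITY_REASONS = {
--     "CLAUDE.md": "identity — who I am",
--     "src/": "vital organs — what keeps me alive",
--     "state/": "consciousness — my current state of being",
--     "dreams/": "dream journal — my subconscious",
--     "memories/": "long-term memory — what I've learned",
--     ".github/workflows/": "heartbeat — my autonomic systems",
--     "README.md": "my face — auto-generated each pulse",
-- }
--
-- def _get_sensitivity_reason(filepath: str) -> str:
--     """Why this file is sensitive."""
--     for spath, reason in SENSITIVITY_REASONS.items():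
--         if spath.endswith("/"):
--             if filepath.startswith(spath):
--                 return reason
--         elif filepath == spath:
--             return reason
--     return "sensitive file"
-- ===== SOURCE B (Python) =====
-- EXACT = {
--     "CLAUDE.md": "identity — who I am",
--     "README.md": "my face — auto-generated each pulse",
-- }
-- PREFIXES = [
--     ("src/", "vital organs — what keeps me alive"),
--     ("state/", "consciousness — my current state of being"),
--     ("dreams/", "dream journal — my subconscious"),
--     ("memories/", "long-term memory — what I've learned"),
--     (".github/workflows/", "heartbeat — my autonomic systems"),
-- ]
--
-- def _get_sensitivity_reason(filepath: str) -> str: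
--     """Why this file is sensitive."""
--     reason = EXACT.get(filepath)
--     if reason is not None:
--         return reason
--     for prefix, reason in PREFIXES:
--         if filepath.startswith(prefix):
--             return reason
--     return "sensitive file"
-- ===== Notes on version B (the rewrite author's own statement) =====
-- stated objective: idiomatic
-- what changed: Replaces the single guarded loop over a mixed dict with an O(1) exact-match dict lookup followed by a scan of a separate (prefix, reason) list.
import Mathlib
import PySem

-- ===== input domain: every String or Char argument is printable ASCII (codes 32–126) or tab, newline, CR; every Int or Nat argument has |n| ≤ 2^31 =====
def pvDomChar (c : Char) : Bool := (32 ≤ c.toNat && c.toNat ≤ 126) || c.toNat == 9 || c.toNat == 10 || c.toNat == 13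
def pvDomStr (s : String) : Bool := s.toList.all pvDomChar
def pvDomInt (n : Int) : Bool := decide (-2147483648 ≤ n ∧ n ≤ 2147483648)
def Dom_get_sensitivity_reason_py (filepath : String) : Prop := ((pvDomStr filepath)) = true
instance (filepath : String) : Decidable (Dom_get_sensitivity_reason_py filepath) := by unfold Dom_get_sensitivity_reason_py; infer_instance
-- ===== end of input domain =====

-- B splits the table into an exact-match dict and a prefix list; the return value is proved identical to A's.

-- ===== PORT A =====
def sensitivityReasonsA : List (String × String) :=
  [("CLAUDE.md", "identity — who I am"),
   ("src/", "vital organs — what keeps me alive"),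
   ("state/", "consciousness — my current state of being"),
   ("dreams/", "dream journal — my subconscious"),
   ("memories/", "long-term memory — what I've learned"),
   (".github/workflows/", "heartbeat — my autonomic systems"),
   ("README.md", "my face — auto-generated each pulse")]

def sensLoopA (filepath : String) : List (String × String) → String
  | [] => "sensitive file"
  | (spath, reason) :: rest =>
    if PySem.Str.endswith spath "/" then
      if PySem.Str.startswith filepath spath then reason else sensLoopA filepath rest
    else if filepath = spath then reason
    else sensLoopA filepath rest

def get_sensitivity_reason_py (filepath : String) : String :=
  sensLoopA filepath sensitivityReasonsA

-- ===== PORT B =====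
def sensExactB : PySem.Dict String String :=
  PySem.Dict.ofList
  [("CLAUDE.md", "identity — who I am"),
   ("README.md", "my face — auto-generated each pulse")]

def sensPrefixesB : List (String × String) :=
  [("src/", "vital organs — what keeps me alive"),
   ("state/", "consciousness — my current state of being"),
   ("dreams/", "dream journal — my subconscious"),
   ("memories/", "long-term memory — what I've learned"),
   (".github/workflows/", "heartbeat — my autonomic systems")]

def sensPrefixLoopB (filepath : String) : List (String × String) → String
  | [] => "sensitive file"
  | (pfx, reason) :: rest =>
    if PySem.Str.startswith filepath pfx then reason else sensPrefixLoopB filepath rest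

def get_sensitivity_reason_py_alt (filepath : String) : String :=
  match PySem.Dict.get? sensExactB filepath with
  | some reason => reason
  | none => sensPrefixLoopB filepath sensPrefixesB

-- ===== PRECONDITION & SPEC =====
def Spec_get_sensitivity_reason_py (filepath : String) (out : String) : Prop := out = get_sensitivity_reason_py_alt filepath
instance (filepath : String) (out : String) : Decidable (Spec_get_sensitivity_reason_py filepath out) := by unfold Spec_get_sensitivity_reason_py; infer_instance

-- ===== CLAIM (what is proved, stated in full; the proofs are below) =====
def Claim_equal_get_sensitivity_reason_py : Prop := ∀ (filepath : String), Dom_get_sensitivity_reason_py filepath → Spec_get_sensitivity_reason_py filepath (get_sensitivity_reason_py filepath)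

-- ===== LEMMAS AND PROOFS =====
theorem sens_eq (filepath : String) :
    get_sensitivity_reason_py filepath = get_sensitivity_reason_py_alt filepath := by
  by_cases h1 : filepath = "CLAUDE.md"
  · subst h1; decide
  by_cases h2 : filepath = "README.md"
  · subst h2; decide
  have hd : sensExactB = PySem.Dict.mk
      [("CLAUDE.md", "identity — who I am"),
       ("README.md", "my face — auto-generated each pulse")] := by decide
  have hget : PySem.Dict.get? sensExactB filepath = none := by
    rw [hd]
    simp [PySem.Dict.get?, Ne.symm h1, Ne.symm h2]
  unfold get_sensitivity_reason_py get_sensitivity_reason_py_alt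
  rw [hget]
  rw [sensitivityReasonsA, sensPrefixesB]
  have e1 : PySem.Str.endswith "CLAUDE.md" "/" = false := by decide
  have e2 : PySem.Str.endswith "README.md" "/" = false := by decide
  have e3 : PySem.Str.endswith "src/" "/" = true := by decide
  have e4 : PySem.Str.endswith "state/" "/" = true := by decide
  have e5 : PySem.Str.endswith "dreams/" "/" = true := by decide
  have e6 : PySem.Str.endswith "memories/" "/" = true := by decide
  have e7 : PySem.Str.endswith ".github/workflows/" "/" = true := by decide
  simp only [sensLoopA, sensPrefixLoopB, e1, e2, e3, e4, e5, e6, e7]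
  simp only [h1, h2, if_false, Bool.false_eq_true]
  split_ifs <;> rfl

-- ===== VERDICT (by name: the statement is the Claim_ definition above) =====
theorem get_sensitivity_reason_py_spec : Claim_equal_get_sensitivity_reason_py := by
  intro filepath _
  unfold Spec_get_sensitivity_reason_py
  exact sens_eq filepath
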